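-- pv_equiv track=rewrite | github.com/RainbowDragon/ACSL | Python/Contest 3/2019 - 2020/VeitchIntermediate.py | getVeitchDiagram
-- ===== SOURCE A (Python) =====
-- def getVeitchDiagram(booleanExpression):
--
--     veitch_diagram = [0] * 16
--     grid = [
--         "1100", "1110", "0110", "0100", "1101", "1111", "0111", "0101",
--         "1001", "1011", "0011", "0001", "1000", "1010", "0010", "0000"]
--     expressions = booleanExpression.replace("+", " ").split(" ")
--
--     for expression in expressions:
--         binary_expression = convertExpression(expression)
--         for k in range(16):
--             if checkMatch(binary_expression, grid[k]):
--                 veitch_diagram[k] = 1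
--
--     result = ""
--     for k in [0, 4, 8, 12]:
--         value = 8 * veitch_diagram[k] + 4 * veitch_diagram[k+1] + 2 * veitch_diagram[k+2] + veitch_diagram[k+3]
--         if value < 10:
--             result += str(value)
--         else:
--             result += chr(ord('A') + value - 10)
--
--     return result
--
-- def convertExpression(expression):
--
--     binary_expression = ""
--
--     for c in "ABCD":
--         if ("~" + c) in expression:
--             binary_expression += "0"
--         elif c in expression:
--             binary_expression += "1"
--         else:
--             binary_expression += "*"
--
--     return binary_expression
--
-- def checkMatch(binary_expression, cell):
--
--     match = True
--     for j in range(4):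
--         if binary_expression[j] != '*' and binary_expression[j] != cell[j]:
--             match = False
--             break
--
--     return match
-- ===== SOURCE B (Python) =====
-- _GRID = [
--     "1100", "1110", "0110", "0100", "1101", "1111", "0111", "0101",
--     "1001", "1011", "0011", "0001", "1000", "1010", "0010", "0000"]
-- # maps each grid string to the bit position inside the mask such that each
-- # nibble of the mask reads off as the corresponding hex digit directly
-- _POS = {cell: 4 * (k // 4) + (3 - k % 4) for k, cell in enumerate(_GRID)}
--
--
-- def getVeitchDiagram(booleanExpression):
--     mask = 0
--     for term in booleanExpression.replace("+", " ").split(" "):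
--         completions = [""]
--         for c in "ABCD":
--             if "~" + c in term:
--                 bits = "0"
--             elif c in term:
--                 bits = "1"
--             else:
--                 bits = "01"
--             completions = [p + b for p in completions for b in bits]
--         for cell in completions:
--             mask |= 1 << _POS[cell]
--     return "".join("0123456789ABCDEF"[(mask >> 4 * g) & 15] for g in range(4))
-- ===== Notes on version B (the rewrite author's own statement) =====
-- stated objective: alternative
-- what changed: Instead of testing each of the 16 grid cells against each term's wildcard pattern and then folding the 0/1 array into hex digits, B keeps the diagram as a single 16-bit integer bitmask whose bit layout already matches the output nibbles (via a precomputed grid-string-to-bit-position dict), enumerates each term's concrete 4-bit completions directly and ORs their bits in, and renders the result by indexing a hex-digit string with each nibble.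
import Mathlib
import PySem

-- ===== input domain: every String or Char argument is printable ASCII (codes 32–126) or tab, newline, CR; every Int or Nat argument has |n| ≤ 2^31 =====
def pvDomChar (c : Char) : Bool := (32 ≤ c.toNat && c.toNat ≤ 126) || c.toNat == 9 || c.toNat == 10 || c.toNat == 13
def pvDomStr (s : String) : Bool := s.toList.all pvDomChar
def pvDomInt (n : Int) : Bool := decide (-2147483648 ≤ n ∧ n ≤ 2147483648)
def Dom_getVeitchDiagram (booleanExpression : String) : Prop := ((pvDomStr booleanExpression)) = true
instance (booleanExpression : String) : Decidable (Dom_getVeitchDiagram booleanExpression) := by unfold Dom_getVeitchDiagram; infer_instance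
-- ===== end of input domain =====

-- B replaces A's per-term scan of all 16 grid cells and the 0/1-array-to-digit pass
-- by one 16-bit integer bitmask whose nibble layout already matches the output:
-- each term's concrete 4-bit completions are ORed in at the bit position a
-- grid-string→position dict (built once) assigns, and the result is rendered by
-- indexing a hex-digit string with the four nibbles.
-- Objective: alternative (a genuinely different traversal, similar cost).

-- ===== PORT A =====
-- the grid strings, as lists of chars (PySem string functions work on List Char)
def pvGridA : List (List Char) :=
  [['1','1','0','0'], ['1','1','1','0'], ['0','1','1','0'], ['0','1','0','0'],
   ['1','1','0','1'], ['1','1','1','1'], ['0','1','1','1'], ['0','1','0','1'],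
   ['1','0','0','1'], ['1','0','1','1'], ['0','0','1','1'], ['0','0','0','1'],
   ['1','0','0','0'], ['1','0','1','0'], ['0','0','1','0'], ['0','0','0','0']]

-- convertExpression: for c in "ABCD", append '0' / '1' / '*'
def pvConvertExpression (expression : String) : List Char :=
  ['A','B','C','D'].foldl (fun acc c =>
    if PySem.Str.isIn (String.ofList ['~', c]) expression then acc ++ ['0']
    else if PySem.Str.isIn (String.ofList [c]) expression then acc ++ ['1']
    else acc ++ ['*']) []

-- checkMatch's loop over j in range(4) with break on the first mismatch;
-- both strings always have length 4 at the call sites, so getD is exact there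
def pvCheckLoop (be cell : List Char) : List Nat → Bool
  | [] => true
  | j :: rest =>
    if be.getD j ' ' ≠ '*' && be.getD j ' ' ≠ cell.getD j ' ' then false
    else pvCheckLoop be cell rest

def pvCheckMatch (be cell : List Char) : Bool := pvCheckLoop be cell [0, 1, 2, 3]

def getVeitchDiagram (booleanExpression : String) : String :=
  -- .split(" ") with the non-empty literal separator never raises, so getD [] is exact
  let expressions := (PySem.Str.split? (PySem.Str.replace booleanExpression "+" " ") " ").getD []
  let veitch := expressions.foldl (fun v e =>
      let be := pvConvertExpression e
      (List.range 16).foldl (fun v k =>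
        if pvCheckMatch be (pvGridA.getD k []) then v.set k 1 else v) v)
    (List.replicate 16 (0 : Int))
  [0, 4, 8, 12].foldl (fun r k =>
      let value : Int := 8 * veitch.getD k 0 + 4 * veitch.getD (k+1) 0
        + 2 * veitch.getD (k+2) 0 + veitch.getD (k+3) 0
      if value < 10 then r ++ PySem.Int.toStr value
      else r ++ String.ofList [Char.ofNat (65 + (value - 10).toNat)]) ""

-- ===== PORT B =====
def pvGridB : List String :=
  ["1100", "1110", "0110", "0100", "1101", "1111", "0111", "0101",
   "1001", "1011", "0011", "0001", "1000", "1010", "0010", "0000"]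

-- _POS = {cell: 4 * (k // 4) + (3 - k % 4) for k, cell in enumerate(_GRID)}
-- (keys are the grid strings, kept as their char lists)
def pvPosB : PySem.Dict (List Char) Int :=
  PySem.Dict.ofList ((PySem.List.enumerate pvGridB).map (fun p =>
    (p.2.toList, 4 * PySem.Int.floordiv p.1 4 + (3 - PySem.Int.mod p.1 4))))

-- the concrete 4-bit completions of one term's wildcard pattern
def pvCompletions (term : String) : List (List Char) :=
  ['A','B','C','D'].foldl (fun comps c =>
    let bits : List Char :=
      if PySem.Str.isIn (String.ofList ['~', c]) term then ['0']
      else if PySem.Str.isIn (String.ofList [c]) term then ['1']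
      else ['0', '1']
    comps.flatMap (fun p => bits.map (fun b => p ++ [b]))) [[]]

def getVeitchDiagram_alt (booleanExpression : String) : String :=
  -- .split(" ") with the non-empty literal separator never raises, so getD [] is exact
  let mask : Nat := ((PySem.Str.split? (PySem.Str.replace booleanExpression "+" " ") " ").getD []).foldl
      (fun m term => (pvCompletions term).foldl
        -- every completion is a key of _POS whose value is a nonneg position, so getD/toNat are exact
        (fun m cell => m ||| (1 <<< ((pvPosB.get? cell).getD 0).toNat)) m) 0
  -- "".join over range(4); g ≥ 0 so (4*g).toNat is exact, and each nibble index is in range of the hex string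
  String.ofList ((PySem.List.pyRange 0 4 1).map (fun g =>
    (PySem.Str.pyGet? "0123456789ABCDEF"
      (((mask >>> (4 * g).toNat) &&& 15 : Nat) : Int)).getD ' '))

-- ===== PRECONDITION & SPEC =====
def Spec_getVeitchDiagram (booleanExpression : String) (out : String) : Prop := out = getVeitchDiagram_alt booleanExpression
instance (booleanExpression : String) (out : String) : Decidable (Spec_getVeitchDiagram booleanExpression out) := by unfold Spec_getVeitchDiagram; infer_instance

-- ===== CLAIM (what is proved, stated in full; the proofs are below) =====
def Claim_equal_getVeitchDiagram : Prop := ∀ (booleanExpression : String), Dom_getVeitchDiagram booleanExpression → Spec_getVeitchDiagram booleanExpression (getVeitchDiagram booleanExpression)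

-- ===== LEMMAS AND PROOFS =====

-- the character convertExpression appends for letter c
def pvBitChar (e : String) (c : Char) : Char :=
  if PySem.Str.isIn (String.ofList ['~', c]) e then '0'
  else if PySem.Str.isIn (String.ofList [c]) e then '1' else '*'

-- the completions determined by one pattern character
def pvBitsOf (c : Char) : List Char :=
  if c = '0' then ['0'] else if c = '1' then ['1'] else ['0', '1']

-- B's completion fold, as a function of the pattern alone
def pvCompOf (p : List Char) : List (List Char) :=
  p.foldl (fun comps c => comps.flatMap (fun q => (pvBitsOf c).map (q ++ [·]))) [[]]

-- the bit position B's dict assigns to grid cell k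
def pvPos (k : Nat) : Nat := 4 * (k / 4) + (3 - k % 4)

-- the 0/1-marking both programs realise: cell j is set iff some term's pattern matches it
def pvMarked (exprs : List String) (j : Nat) : Bool :=
  exprs.any (fun e => pvCheckMatch (pvConvertExpression e) (pvGridA.getD j []))

theorem pvConv_eq (e : String) :
    pvConvertExpression e = [pvBitChar e 'A', pvBitChar e 'B', pvBitChar e 'C', pvBitChar e 'D'] := by
  simp only [pvConvertExpression, pvBitChar, List.foldl]
  split_ifs <;> rfl

theorem pvBits_eq (e : String) (c : Char) :
    (if PySem.Str.isIn (String.ofList ['~', c]) e then ['0']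
     else if PySem.Str.isIn (String.ofList [c]) e then ['1'] else ['0', '1'])
    = pvBitsOf (pvBitChar e c) := by
  simp only [pvBitsOf, pvBitChar]
  split_ifs <;> simp_all

theorem pvCompletions_eq (e : String) : pvCompletions e = pvCompOf (pvConvertExpression e) := by
  simp only [pvCompletions, pvCompOf, pvConv_eq, List.foldl, pvBits_eq]

theorem pvBitChar_mem (e : String) (c : Char) : pvBitChar e c ∈ ['0', '1', '*'] := by
  simp only [pvBitChar]; split_ifs <;> simp

-- the finite core, as one Bool computation the kernel evaluates
def pvKeyB : Bool :=
  ['0','1','*'].all fun b1 => ['0','1','*'].all fun b2 =>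
    ['0','1','*'].all fun b3 => ['0','1','*'].all fun b4 =>
      (List.range 16).all fun k =>
        ((pvCompOf [b1, b2, b3, b4]).any (fun cell => ((pvPosB.get? cell).getD 0).toNat == pvPos k))
          == pvCheckMatch [b1, b2, b3, b4] (pvGridA.getD k [])

set_option maxRecDepth 20000 in
theorem pvKeyB_true : pvKeyB = true := by decide

-- for every pattern over {0,1,*}: ORing the completions' positions sets bit pvPos k
-- exactly when checkMatch accepts cell k
theorem pvKey (b1 b2 b3 b4 : Char) (h1 : b1 ∈ ['0','1','*']) (h2 : b2 ∈ ['0','1','*'])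
    (h3 : b3 ∈ ['0','1','*']) (h4 : b4 ∈ ['0','1','*']) (k : Nat) (hk : k < 16) :
    ((pvCompOf [b1, b2, b3, b4]).any (fun cell => ((pvPosB.get? cell).getD 0).toNat == pvPos k))
      = pvCheckMatch [b1, b2, b3, b4] (pvGridA.getD k []) := by
  have h := pvKeyB_true
  simp only [pvKeyB, List.all_eq_true, beq_iff_eq] at h
  exact h b1 h1 b2 h2 b3 h3 b4 h4 k (List.mem_range.mpr hk)

-- the per-term bridge: B's "some completion ORs in bit pvPos k" is A's checkMatch
theorem pvBridge (e : String) (k : Nat) (hk : k < 16) :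
    ((pvCompletions e).any (fun cell => ((pvPosB.get? cell).getD 0).toNat == pvPos k))
      = pvCheckMatch (pvConvertExpression e) (pvGridA.getD k []) := by
  rw [pvCompletions_eq, pvConv_eq]
  exact pvKey _ _ _ _ (pvBitChar_mem e 'A') (pvBitChar_mem e 'B')
    (pvBitChar_mem e 'C') (pvBitChar_mem e 'D') k hk

theorem pvTb (n k : Nat) : ((1 : Nat) <<< n).testBit k = (k == n) := by
  rw [Nat.one_shiftLeft, Nat.testBit_two_pow]
  by_cases h : n = k <;> simp [h] <;> exact fun e => h e.symm

-- one OR-accumulating fold, bitwise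
theorem pvTestBit_foldl (comps : List (List Char)) (m : Nat) (k : Nat) :
    (comps.foldl (fun m cell => m ||| (1 <<< ((pvPosB.get? cell).getD 0).toNat)) m).testBit k
      = (m.testBit k || comps.any (fun cell => ((pvPosB.get? cell).getD 0).toNat == k)) := by
  induction comps generalizing m with
  | nil => simp
  | cons c cs ih =>
    simp only [List.foldl_cons, List.any_cons, ih, Nat.testBit_or, pvTb]
    generalize ((pvPosB.get? c).getD 0).toNat = i
    by_cases hki : k = i
    · subst hki; cases m.testBit k <;> simp
    · have h1 : (k == i) = false := by simp [hki]
      have h2 : (i == k) = false := by simp; exact fun h => hki h.symm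
      simp [h1, h2]

-- B's whole mask fold, bitwise at the positions the dict assigns
theorem pvMask_char (exprs : List String) (m : Nat) (k : Nat) (hk : k < 16) :
    (exprs.foldl (fun m term => (pvCompletions term).foldl
        (fun m cell => m ||| (1 <<< ((pvPosB.get? cell).getD 0).toNat)) m) m).testBit (pvPos k)
      = (m.testBit (pvPos k) || pvMarked exprs k) := by
  induction exprs generalizing m with
  | nil => simp [pvMarked]
  | cons e rest ih =>
    simp only [List.foldl_cons, ih, pvMarked, List.any_cons, pvTestBit_foldl, pvBridge e k hk]
    cases m.testBit (pvPos k) <;> simp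

theorem pvSet_getD (v : List Int) (a j : Nat) :
    (v.set a (1:Int)).getD j 0 = if a = j ∧ a < v.length then 1 else v.getD j 0 := by
  simp only [List.getD_eq_getElem?_getD, List.getElem?_set]
  split_ifs with h1 h2 h3 <;> simp_all <;> omega

theorem pvFoldSet_length (l : List Nat) (c : Nat → Bool) (v : List Int) :
    (l.foldl (fun v k => if c k then v.set k 1 else v) v).length = v.length := by
  induction l generalizing v with
  | nil => rfl
  | cons a l ih => simp only [List.foldl_cons]; rw [ih]; split <;> simp

theorem pvFoldSet_getD (l : List Nat) (c : Nat → Bool) (v : List Int) (j : Nat) (hj : j < v.length) :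
    (l.foldl (fun v k => if c k then v.set k 1 else v) v).getD j 0
      = if j ∈ l ∧ c j then 1 else v.getD j 0 := by
  induction l generalizing v with
  | nil => simp
  | cons a l ih =>
    simp only [List.foldl_cons]
    rw [ih]
    · by_cases haj : a = j
      · subst haj
        by_cases hcj : c a
        · simp only [hcj, if_true, pvSet_getD, hj, and_true, List.mem_cons, true_or]
          split <;> simp
        · simp [hcj, List.mem_cons]
      · have haj' : j ≠ a := fun h => haj h.symm
        have hsame : (if c a then v.set a 1 else v).getD j 0 = v.getD j 0 := by
          split <;> simp [haj]
        rw [hsame]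
        simp [List.mem_cons, haj']
    · split <;> simp [hj]

-- A's whole veitch fold, cellwise
theorem pvVeitch_char (exprs : List String) (v : List Int) (hv : v.length = 16)
    (j : Nat) (hj : j < 16) :
    (exprs.foldl (fun v e =>
        (List.range 16).foldl (fun v k =>
          if pvCheckMatch (pvConvertExpression e) (pvGridA.getD k []) then v.set k 1 else v) v) v).getD j 0
      = if pvMarked exprs j then 1 else v.getD j 0 := by
  induction exprs generalizing v with
  | nil => simp [pvMarked]
  | cons e rest ih =>
    simp only [List.foldl_cons]
    rw [ih _ (by rw [pvFoldSet_length, hv]),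
        pvFoldSet_getD _ _ _ j (by rw [hv]; exact hj)]
    simp only [List.mem_range, hj, true_and, pvMarked, List.any_cons]
    by_cases h1 : pvCheckMatch (pvConvertExpression e) (pvGridA.getD j []) <;>
      by_cases h2 : rest.any (fun e => pvCheckMatch (pvConvertExpression e) (pvGridA.getD j [])) <;>
      simp_all

-- a nibble of a Nat, read bit by bit
theorem pvNibble (x : Nat) : x &&& 15 =
    (if x.testBit 3 then 8 else 0) + (if x.testBit 2 then 4 else 0)
      + (if x.testBit 1 then 2 else 0) + (if x.testBit 0 then 1 else 0) := by
  have h15 : x &&& 15 = x % 16 := by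
    have := Nat.and_two_pow_sub_one_eq_mod x 4
    norm_num at this
    exact this
  rw [h15]
  simp only [Nat.testBit_eq_decide_div_mod_eq, decide_eq_true_eq]
  norm_num
  split_ifs <;> omega

theorem pvReplicate_getD (j : Nat) (h : j < 16) : (List.replicate 16 (0:Int)).getD j 0 = 0 := by
  simp only [List.getD_eq_getElem?_getD]
  interval_cases j <;> rfl

-- one output digit: A's branchy rendering of the Int value equals B's hex-string lookup
-- of the matching nibble, for every combination of the four marked bits
theorem pvDigit (w x y z : Bool) :
    (if (8 * (if w then (1:Int) else 0) + 4 * (if x then (1:Int) else 0)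
          + 2 * (if y then (1:Int) else 0) + (if z then (1:Int) else 0)) < 10 then
        PySem.Int.toStr (8 * (if w then (1:Int) else 0) + 4 * (if x then (1:Int) else 0)
          + 2 * (if y then (1:Int) else 0) + (if z then (1:Int) else 0))
     else String.ofList [Char.ofNat (65 + ((8 * (if w then (1:Int) else 0)
          + 4 * (if x then (1:Int) else 0) + 2 * (if y then (1:Int) else 0)
          + (if z then (1:Int) else 0)) - 10).toNat)])
    = String.ofList [(PySem.Str.pyGet? "0123456789ABCDEF"
        (((8 * (if w then (1:Nat) else 0) + 4 * (if x then (1:Nat) else 0)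
          + 2 * (if y then (1:Nat) else 0) + (if z then (1:Nat) else 0)) : Nat) : Int)).getD ' '] := by
  cases w <;> cases x <;> cases y <;> cases z <;> decide

-- pvDigit with the fold's accumulator prepended, the shape A's loop body has
theorem pvDigitR (r : String) (w x y z : Bool) :
    (if (8 * (if w then (1:Int) else 0) + 4 * (if x then (1:Int) else 0)
          + 2 * (if y then (1:Int) else 0) + (if z then (1:Int) else 0)) < 10 then
        r ++ PySem.Int.toStr (8 * (if w then (1:Int) else 0) + 4 * (if x then (1:Int) else 0)
          + 2 * (if y then (1:Int) else 0) + (if z then (1:Int) else 0))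
     else r ++ String.ofList [Char.ofNat (65 + ((8 * (if w then (1:Int) else 0)
          + 4 * (if x then (1:Int) else 0) + 2 * (if y then (1:Int) else 0)
          + (if z then (1:Int) else 0)) - 10).toNat)])
    = r ++ String.ofList [(PySem.Str.pyGet? "0123456789ABCDEF"
        (((8 * (if w then (1:Nat) else 0) + 4 * (if x then (1:Nat) else 0)
          + 2 * (if y then (1:Nat) else 0) + (if z then (1:Nat) else 0)) : Nat) : Int)).getD ' '] := by
  rw [← apply_ite (fun t => r ++ t)]
  exact congrArg (fun t => r ++ t) (pvDigit w x y z)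


-- ===== VERDICT (by name: the statement is the Claim_ definition above) =====
theorem getVeitchDiagram_spec : Claim_equal_getVeitchDiagram := by
  intro s _
  show getVeitchDiagram s = getVeitchDiagram_alt s
  unfold getVeitchDiagram getVeitchDiagram_alt
  generalize (PySem.Str.split? (PySem.Str.replace s "+" " ") " ").getD [] = exprs
  have hveq : ∀ j : Nat, j < 16 →
      ((exprs.foldl (fun v e =>
          let be := pvConvertExpression e
          (List.range 16).foldl (fun v k =>
            if pvCheckMatch be (pvGridA.getD k []) then v.set k 1 else v) v)
        (List.replicate 16 (0 : Int))).getD j 0 : Int)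
      = (if pvMarked exprs j then (1:Int) else 0) := by
    intro j hj
    rw [pvVeitch_char exprs _ (by simp) j hj, pvReplicate_getD j hj]
  have hnib : ∀ g : Nat, g < 4 →
      ((exprs.foldl (fun m term => (pvCompletions term).foldl
          (fun m cell => m ||| (1 <<< ((pvPosB.get? cell).getD 0).toNat)) m) 0) >>> (4*g)) &&& 15
      = 8 * (if pvMarked exprs (4*g) then (1:Nat) else 0)
        + 4 * (if pvMarked exprs (4*g+1) then (1:Nat) else 0)
        + 2 * (if pvMarked exprs (4*g+2) then (1:Nat) else 0)
        + (if pvMarked exprs (4*g+3) then (1:Nat) else 0) := by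
    intro g hg
    have htb : ∀ k : Nat, k < 16 →
        (exprs.foldl (fun m term => (pvCompletions term).foldl
            (fun m cell => m ||| (1 <<< ((pvPosB.get? cell).getD 0).toNat)) m) 0).testBit (pvPos k)
        = pvMarked exprs k := by
      intro k hk
      rw [pvMask_char exprs 0 k hk]; simp
    have e0 : pvPos (4*g) = 4*g+3 := by unfold pvPos; omega
    have e1 : pvPos (4*g+1) = 4*g+2 := by unfold pvPos; omega
    have e2 : pvPos (4*g+2) = 4*g+1 := by unfold pvPos; omega
    have e3 : pvPos (4*g+3) = 4*g := by unfold pvPos; omega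
    have t0 := htb (4*g) (by omega); rw [e0] at t0
    have t1 := htb (4*g+1) (by omega); rw [e1] at t1
    have t2 := htb (4*g+2) (by omega); rw [e2] at t2
    have t3 := htb (4*g+3) (by omega); rw [e3] at t3
    rw [pvNibble]
    simp only [Nat.testBit_shiftRight, Nat.add_zero]
    rw [t0, t1, t2, t3]
    split_ifs <;> norm_num
  have hpr : PySem.List.pyRange 0 4 1 = [(0:Int),1,2,3] := by decide
  rw [hpr]
  simp only [List.map, List.foldl]
  rw [hveq 0 (by norm_num), hveq (0+1) (by norm_num), hveq (0+2) (by norm_num),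
      hveq (0+3) (by norm_num), hveq 4 (by norm_num), hveq (4+1) (by norm_num),
      hveq (4+2) (by norm_num), hveq (4+3) (by norm_num), hveq 8 (by norm_num),
      hveq (8+1) (by norm_num), hveq (8+2) (by norm_num), hveq (8+3) (by norm_num),
      hveq 12 (by norm_num), hveq (12+1) (by norm_num), hveq (12+2) (by norm_num),
      hveq (12+3) (by norm_num)]
  have h0 := hnib 0 (by norm_num); have h1 := hnib 1 (by norm_num)
  have h2 := hnib 2 (by norm_num); have h3 := hnib 3 (by norm_num)
  simp only [show 4*0 = 0 from rfl, show 4*0+1 = 1 from rfl, show 4*0+2 = 2 from rfl,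
    show 4*0+3 = 3 from rfl, Nat.shiftRight_zero] at h0
  simp only [show 4*1 = 4 from rfl, show 4*1+1 = 5 from rfl, show 4*1+2 = 6 from rfl,
    show 4*1+3 = 7 from rfl] at h1
  simp only [show 4*2 = 8 from rfl, show 4*2+1 = 9 from rfl, show 4*2+2 = 10 from rfl,
    show 4*2+3 = 11 from rfl] at h2
  simp only [show 4*3 = 12 from rfl, show 4*3+1 = 13 from rfl, show 4*3+2 = 14 from rfl,
    show 4*3+3 = 15 from rfl] at h3
  simp only [show ((4:Int)*0).toNat = 0 from rfl, show ((4:Int)*1).toNat = 4 from rfl,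
    show ((4:Int)*2).toNat = 8 from rfl, show ((4:Int)*3).toNat = 12 from rfl,
    Nat.shiftRight_zero]
  rw [h0, h1, h2, h3]
  simp only [pvDigitR]
  apply String.toList_inj.mp
  simp [String.toList_append]
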